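-- pv_equiv track=rewrite | github.com/jeroenpersoon/Cauliflower_restart | cauliflower/T22species_oleracea15/pangenome/Variation_table.py | change_notblasted
-- ===== SOURCE A (Python) =====
-- def change_notblasted(not_blasted):
--     not_blasted_id_genomes = []
--     for item in not_blasted:
--         if "rna" in item:
--             not_blasted_id_genomes.append(item+'_genome_1')
--             continue
--         elif "bro" in item:
--             not_blasted_id_genomes.append(item+'_genome_2')
--             continue
--         elif "T02" in item:
--             not_blasted_id_genomes.append(item+'_genome_3')
--             continue
--         elif "T07" in item:
--             not_blasted_id_genomes.append(item+'_genome_4')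
--             continue
--         elif "T13" in item:
--             not_blasted_id_genomes.append(item+'_genome_5')
--             continue
--         elif "T06" in item:
--             not_blasted_id_genomes.append(item+'_genome_6')
--             continue
--         elif "T24" in item:
--             not_blasted_id_genomes.append(item+'_genome_7')
--             continue
--         elif "T19" in item:
--             not_blasted_id_genomes.append(item+'_genome_8')
--             continue
--         elif "T12" in item:
--             not_blasted_id_genomes.append(item + '_genome_9')
--             continue
--         elif "T10" in item:
--             not_blasted_id_genomes.append(item+'_genome_10')
--             continue
--         elif "T08" in item:
--             not_blasted_id_genomes.append(item+'_genome_11')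
--             continue
--         elif "T17" in item:
--             not_blasted_id_genomes.append(item+'_genome_12')
--             continue
--         elif "T21" in item:
--             not_blasted_id_genomes.append(item+'_genome_13')
--             continue
--         elif "BolO_" in item:
--             not_blasted_id_genomes.append(item+'_genome_14')
--             continue
--         elif "T22" in item:
--             not_blasted_id_genomes.append(item+'_genome_15')
--             continue
--     return not_blasted_id_genomes
-- ===== SOURCE B (Python) =====
-- PATTERNS = [
--     ("rna", "_genome_1"), ("bro", "_genome_2"), ("T02", "_genome_3"),
--     ("T07", "_genome_4"), ("T13", "_genome_5"), ("T06", "_genome_6"),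
--     ("T24", "_genome_7"), ("T19", "_genome_8"), ("T12", "_genome_9"),
--     ("T10", "_genome_10"), ("T08", "_genome_11"), ("T17", "_genome_12"),
--     ("T21", "_genome_13"), ("BolO_", "_genome_14"), ("T22", "_genome_15"),
-- ]
--
-- def change_notblasted(not_blasted):
--     # Staged passes: sweep the patterns from lowest to highest priority and
--     # overwrite chosen[i]; the last write per index is the highest-priority match.
--     chosen = [None] * len(not_blasted)
--     for pat, suf in reversed(PATTERNS):
--         for i, item in enumerate(not_blasted):
--             if pat in item:
--                 chosen[i] = suf
--     return [item + suf for item, suf in zip(not_blasted, chosen) if suf is not None]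
-- ===== Notes on version B (the rewrite author's own statement) =====
-- stated objective: alternative
-- what changed: Replaces A's per-item 15-branch if/elif first-match chain by staged passes: one sweep of the whole list per pattern in reverse priority order, overwriting a per-index chosen array so the last write is the highest-priority match, then one zip pass builds the output.
import Mathlib
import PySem

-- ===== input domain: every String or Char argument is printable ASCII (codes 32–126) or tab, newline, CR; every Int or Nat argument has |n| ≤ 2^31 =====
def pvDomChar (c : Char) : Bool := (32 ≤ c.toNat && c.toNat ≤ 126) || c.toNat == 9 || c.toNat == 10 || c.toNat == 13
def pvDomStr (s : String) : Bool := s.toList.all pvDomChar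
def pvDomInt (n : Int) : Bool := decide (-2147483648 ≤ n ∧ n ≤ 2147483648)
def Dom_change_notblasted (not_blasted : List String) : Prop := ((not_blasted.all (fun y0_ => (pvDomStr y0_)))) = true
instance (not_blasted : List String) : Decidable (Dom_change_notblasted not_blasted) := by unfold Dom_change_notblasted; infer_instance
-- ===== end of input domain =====

-- B replaces A's per-item if/elif chain by staged passes: one sweep per pattern in
-- reverse priority order overwriting a per-index chosen array, then one zip pass
-- (objective: alternative, same cost).

-- exact Python string concatenation (kernel-transparent, via List Char)
def pyCat (a b : String) : String := String.ofList (a.toList ++ b.toList)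

-- ===== PORT A =====
def change_notblasted (not_blasted : List String) : List String :=
  not_blasted.foldl (fun acc item =>
    if PySem.Str.isIn "rna" item then acc ++ [pyCat item "_genome_1"]
    else if PySem.Str.isIn "bro" item then acc ++ [pyCat item "_genome_2"]
    else if PySem.Str.isIn "T02" item then acc ++ [pyCat item "_genome_3"]
    else if PySem.Str.isIn "T07" item then acc ++ [pyCat item "_genome_4"]
    else if PySem.Str.isIn "T13" item then acc ++ [pyCat item "_genome_5"]
    else if PySem.Str.isIn "T06" item then acc ++ [pyCat item "_genome_6"]
    else if PySem.Str.isIn "T24" item then acc ++ [pyCat item "_genome_7"]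
    else if PySem.Str.isIn "T19" item then acc ++ [pyCat item "_genome_8"]
    else if PySem.Str.isIn "T12" item then acc ++ [pyCat item "_genome_9"]
    else if PySem.Str.isIn "T10" item then acc ++ [pyCat item "_genome_10"]
    else if PySem.Str.isIn "T08" item then acc ++ [pyCat item "_genome_11"]
    else if PySem.Str.isIn "T17" item then acc ++ [pyCat item "_genome_12"]
    else if PySem.Str.isIn "T21" item then acc ++ [pyCat item "_genome_13"]
    else if PySem.Str.isIn "BolO_" item then acc ++ [pyCat item "_genome_14"]
    else if PySem.Str.isIn "T22" item then acc ++ [pyCat item "_genome_15"]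
    else acc) []

-- ===== PORT B =====
def pvPatterns : List (String × String) :=
  [("rna", "_genome_1"), ("bro", "_genome_2"), ("T02", "_genome_3"),
   ("T07", "_genome_4"), ("T13", "_genome_5"), ("T06", "_genome_6"),
   ("T24", "_genome_7"), ("T19", "_genome_8"), ("T12", "_genome_9"),
   ("T10", "_genome_10"), ("T08", "_genome_11"), ("T17", "_genome_12"),
   ("T21", "_genome_13"), ("BolO_", "_genome_14"), ("T22", "_genome_15")]

-- one sweep: for i, item in enumerate(not_blasted): if pat in item: chosen[i] = suf
-- (the enumerate index is a nonnegative in-range Int, so .toNat here is exact Python)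
def pvSweep (pat suf : String) (nb : List String) (chosen : List (Option String)) : List (Option String) :=
  (PySem.List.enumerate nb).foldl (fun ch p =>
    if PySem.Str.isIn pat p.2 then ch.set p.1.toNat (some suf) else ch) chosen

def change_notblasted_alt (not_blasted : List String) : List String :=
  let chosen := pvPatterns.reverse.foldl
      (fun ch ps => pvSweep ps.1 ps.2 not_blasted ch)
      (List.replicate not_blasted.length none)
  (not_blasted.zip chosen).foldr (fun p out =>
    match p.2 with
    | some suf => pyCat p.1 suf :: out
    | none => out) []

-- ===== PRECONDITION & SPEC =====
def Spec_change_notblasted (not_blasted : List String) (out : List String) : Prop := out = change_notblasted_alt not_blasted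
instance (not_blasted : List String) (out : List String) : Decidable (Spec_change_notblasted not_blasted out) := by unfold Spec_change_notblasted; infer_instance

-- ===== CLAIM (what is proved, stated in full; the proofs are below) =====
def Claim_equal_change_notblasted : Prop := ∀ (not_blasted : List String), Dom_change_notblasted not_blasted → Spec_change_notblasted not_blasted (change_notblasted not_blasted)

-- ===== LEMMAS AND PROOFS =====

-- first-match lookup in a priority table (proof-side characterisation of A's chain)
def pvFirstSuffix (table : List (String × String)) (item : String) : Option String :=
  match table with
  | [] => none
  | (pat, suf) :: rest =>
    if PySem.Str.isIn pat item then some suf else pvFirstSuffix rest item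

-- A's accumulator step, on one item, appends according to the first-match lookup
set_option maxHeartbeats 2000000 in
theorem pv_step_eq (acc : List String) (item : String) :
    (if PySem.Str.isIn "rna" item then acc ++ [pyCat item "_genome_1"]
    else if PySem.Str.isIn "bro" item then acc ++ [pyCat item "_genome_2"]
    else if PySem.Str.isIn "T02" item then acc ++ [pyCat item "_genome_3"]
    else if PySem.Str.isIn "T07" item then acc ++ [pyCat item "_genome_4"]
    else if PySem.Str.isIn "T13" item then acc ++ [pyCat item "_genome_5"]
    else if PySem.Str.isIn "T06" item then acc ++ [pyCat item "_genome_6"]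
    else if PySem.Str.isIn "T24" item then acc ++ [pyCat item "_genome_7"]
    else if PySem.Str.isIn "T19" item then acc ++ [pyCat item "_genome_8"]
    else if PySem.Str.isIn "T12" item then acc ++ [pyCat item "_genome_9"]
    else if PySem.Str.isIn "T10" item then acc ++ [pyCat item "_genome_10"]
    else if PySem.Str.isIn "T08" item then acc ++ [pyCat item "_genome_11"]
    else if PySem.Str.isIn "T17" item then acc ++ [pyCat item "_genome_12"]
    else if PySem.Str.isIn "T21" item then acc ++ [pyCat item "_genome_13"]
    else if PySem.Str.isIn "BolO_" item then acc ++ [pyCat item "_genome_14"]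
    else if PySem.Str.isIn "T22" item then acc ++ [pyCat item "_genome_15"]
    else acc) =
    acc ++ (match pvFirstSuffix pvPatterns item with
            | some suf => [pyCat item suf]
            | none => []) := by
  simp only [pvPatterns, pvFirstSuffix]
  by_cases h1 : PySem.Str.isIn "rna" item = true
  · simp_all
  by_cases h2 : PySem.Str.isIn "bro" item = true
  · simp_all
  by_cases h3 : PySem.Str.isIn "T02" item = true
  · simp_all
  by_cases h4 : PySem.Str.isIn "T07" item = true
  · simp_all
  by_cases h5 : PySem.Str.isIn "T13" item = true
  · simp_all
  by_cases h6 : PySem.Str.isIn "T06" item = true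
  · simp_all
  by_cases h7 : PySem.Str.isIn "T24" item = true
  · simp_all
  by_cases h8 : PySem.Str.isIn "T19" item = true
  · simp_all
  by_cases h9 : PySem.Str.isIn "T12" item = true
  · simp_all
  by_cases h10 : PySem.Str.isIn "T10" item = true
  · simp_all
  by_cases h11 : PySem.Str.isIn "T08" item = true
  · simp_all
  by_cases h12 : PySem.Str.isIn "T17" item = true
  · simp_all
  by_cases h13 : PySem.Str.isIn "T21" item = true
  · simp_all
  by_cases h14 : PySem.Str.isIn "BolO_" item = true
  · simp_all
  by_cases h15 : PySem.Str.isIn "T22" item = true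
  · simp_all
  simp_all

-- A's fold produces, for each item in order, the first-match suffix (or nothing)
theorem pv_foldl_inv (l : List String) (acc : List String) :
    l.foldl (fun acc item =>
      if PySem.Str.isIn "rna" item then acc ++ [pyCat item "_genome_1"]
      else if PySem.Str.isIn "bro" item then acc ++ [pyCat item "_genome_2"]
      else if PySem.Str.isIn "T02" item then acc ++ [pyCat item "_genome_3"]
      else if PySem.Str.isIn "T07" item then acc ++ [pyCat item "_genome_4"]
      else if PySem.Str.isIn "T13" item then acc ++ [pyCat item "_genome_5"]
      else if PySem.Str.isIn "T06" item then acc ++ [pyCat item "_genome_6"]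
      else if PySem.Str.isIn "T24" item then acc ++ [pyCat item "_genome_7"]
      else if PySem.Str.isIn "T19" item then acc ++ [pyCat item "_genome_8"]
      else if PySem.Str.isIn "T12" item then acc ++ [pyCat item "_genome_9"]
      else if PySem.Str.isIn "T10" item then acc ++ [pyCat item "_genome_10"]
      else if PySem.Str.isIn "T08" item then acc ++ [pyCat item "_genome_11"]
      else if PySem.Str.isIn "T17" item then acc ++ [pyCat item "_genome_12"]
      else if PySem.Str.isIn "T21" item then acc ++ [pyCat item "_genome_13"]
      else if PySem.Str.isIn "BolO_" item then acc ++ [pyCat item "_genome_14"]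
      else if PySem.Str.isIn "T22" item then acc ++ [pyCat item "_genome_15"]
      else acc) acc =
    acc ++ (l.map (fun item => (item, pvFirstSuffix pvPatterns item))).foldr
      (fun p out =>
        match p.2 with
        | some suf => pyCat p.1 suf :: out
        | none => out) [] := by
  induction l generalizing acc with
  | nil => simp
  | cons x xs ih =>
    rw [List.foldl_cons, pv_step_eq, ih, List.map_cons, List.foldr_cons]
    cases pvFirstSuffix pvPatterns x <;> simp

-- setting exactly at the end of the prefix
theorem pv_set_mid {α : Type} (pre : List α) (a : α) (t : List α) (v : α) :
    (pre ++ a :: t).set pre.length v = pre ++ v :: t := by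
  induction pre with
  | nil => simp
  | cons p ps ih => simp [ih]

-- one sweep over chosen = pre ++ nb.map g rewrites exactly the mapped tail
theorem pv_sweep_aux (pat suf : String) (nb : List String) :
    ∀ (s : Nat) (pre : List (Option String)) (g : String → Option String),
    pre.length = s →
    (PySem.List.enumerate nb (s : Int)).foldl (fun ch p =>
        if PySem.Str.isIn pat p.2 then ch.set p.1.toNat (some suf) else ch)
      (pre ++ nb.map g) =
    pre ++ nb.map (fun it => if PySem.Str.isIn pat it then some suf else g it) := by
  induction nb with
  | nil => intro s pre g _; simp [PySem.List.enumerate_nil]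
  | cons x xs ih =>
    intro s pre g hs
    rw [PySem.List.enumerate_cons, List.foldl_cons]
    by_cases hx : PySem.Str.isIn pat x = true
    · simp only [hx, if_pos, List.map_cons]
      have hset : (pre ++ (g x) :: xs.map g).set ((s : Int)).toNat (some suf)
          = pre ++ (some suf) :: xs.map g := by
        have : ((s : Int)).toNat = pre.length := by omega
        rw [this, pv_set_mid]
      rw [hset]
      have := ih (s + 1) (pre ++ [some suf]) g (by simp [hs])
      have hcast : ((s : Int) + 1) = ((s + 1 : Nat) : Int) := by push_cast; ring
      rw [hcast]
      simpa [hx] using this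
    · simp only [hx, if_neg, Bool.false_eq_true, not_false_iff, List.map_cons]
      have := ih (s + 1) (pre ++ [g x]) g (by simp [hs])
      have hcast : ((s : Int) + 1) = ((s + 1 : Nat) : Int) := by push_cast; ring
      rw [hcast]
      simpa [hx] using this

theorem pv_sweep_map (pat suf : String) (nb : List String) (g : String → Option String) :
    pvSweep pat suf nb (nb.map g) =
    nb.map (fun it => if PySem.Str.isIn pat it then some suf else g it) := by
  simpa using pv_sweep_aux pat suf nb 0 [] g rfl

-- the outer fold of sweeps pushes inside the map, item by item
theorem pv_outer (nb : List String) :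
    ∀ (ps : List (String × String)) (g : String → Option String),
    ps.foldl (fun ch q => pvSweep q.1 q.2 nb ch) (nb.map g) =
    nb.map (fun it => ps.foldl (fun o q => if PySem.Str.isIn q.1 it then some q.2 else o) (g it)) := by
  intro ps
  induction ps with
  | nil => intro g; rfl
  | cons q qs ih =>
    intro g
    rw [List.foldl_cons, pv_sweep_map, ih]
    simp

-- processing the reversed table with overwrite = first match in the forward table
theorem pv_rev_foldl (it : String) :
    ∀ (ps : List (String × String)) (o : Option String),
    ps.reverse.foldl (fun o q => if PySem.Str.isIn q.1 it then some q.2 else o) o =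
    (match pvFirstSuffix ps it with
     | some s => some s
     | none => o) := by
  intro ps
  induction ps with
  | nil => intro o; simp [pvFirstSuffix]
  | cons q qs ih =>
    intro o
    rw [List.reverse_cons, List.foldl_append, List.foldl_cons, List.foldl_nil, ih]
    simp only [pvFirstSuffix, PySem.Str.isIn]
    split_ifs <;> rfl

theorem pv_zip_map {α β : Type} (l : List α) (f : α → β) :
    l.zip (l.map f) = l.map (fun x => (x, f x)) := by
  induction l with
  | nil => rfl
  | cons x xs ih => simp [ih]

-- ===== VERDICT (by name: the statement is the Claim_ definition above) =====
theorem change_notblasted_spec : Claim_equal_change_notblasted := by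
  intro nb _
  unfold Spec_change_notblasted change_notblasted
  simp only [change_notblasted_alt]
  have hrep : List.replicate nb.length (none : Option String)
      = nb.map (fun _ => none) := by simp
  rw [hrep, pv_outer]
  have hchar : (fun it => pvPatterns.reverse.foldl
        (fun o q => if PySem.Str.isIn q.1 it then some q.2 else o) none)
      = fun it => (match pvFirstSuffix pvPatterns it with
                   | some s => some s
                   | none => none) := by
    funext it; exact pv_rev_foldl it pvPatterns none
  rw [hchar, pv_zip_map]
  have hmap : (nb.map (fun it => (it, match pvFirstSuffix pvPatterns it with
                   | some s => some s
                   | none => (none : Option String))))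
      = nb.map (fun it => (it, pvFirstSuffix pvPatterns it)) := by
    apply List.map_congr_left; intro a _
    cases pvFirstSuffix pvPatterns a <;> simp
  rw [hmap]
  simpa using pv_foldl_inv nb []
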